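-- pv_equiv track=rewrite | github.com/ttzz0035/Work | excel_transfer/services/transfer.py | _rect_of_cells
-- ===== SOURCE A (Python) =====
-- from typing import Dict, Tuple, List, Optional, Set
--
-- def _rect_of_cells(cells: Set[Tuple[int,int]]) -> Tuple[Tuple[int,int], Tuple[int,int], bool]:
--     """
--     与えられたセル集合が完全に矩形充填しているかを判定。
--     戻り値: ((r1,c1),(r2,c2), is_full)
--       - is_full=True の場合、cells は (r1..r2)×(c1..c2) を完全に含む
--     """
--     rows = [r for r,_ in cells]
--     cols = [c for _,c in cells]
--     r1, r2 = min(rows), max(rows)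
--     c1, c2 = min(cols), max(cols)
--     expected = (r2 - r1 + 1) * (c2 - c1 + 1)
--     is_full = (len(cells) == expected)
--     return (r1,c1), (r2,c2), is_full
-- ===== SOURCE B (Python) =====
-- def _rect_of_cells(cells):
--     it = iter(cells)
--     try:
--         r1, c1 = next(it)
--     except StopIteration:
--         raise ValueError("empty cell set")
--     r2, c2 = r1, c1
--     for r, c in it:
--         if r < r1: r1 = r
--         if c < c1: c1 = c
--         if r > r2: r2 = r
--         if c > c2: c2 = c
--     is_full = all((r, c) in cells
--                   for r in range(r1, r2 + 1)
--                   for c in range(c1, c2 + 1))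
--     return (r1, c1), (r2, c2), is_full
-- ===== Notes on version B (the rewrite author's own statement) =====
-- stated objective: alternative
-- what changed: B finds the bounding box in one running-min/max pass over the set (instead of building two coordinate lists and calling min/max four times) and decides fullness by scanning the bounding rectangle for membership instead of comparing the set's size with the rectangle's area.
import Mathlib
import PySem

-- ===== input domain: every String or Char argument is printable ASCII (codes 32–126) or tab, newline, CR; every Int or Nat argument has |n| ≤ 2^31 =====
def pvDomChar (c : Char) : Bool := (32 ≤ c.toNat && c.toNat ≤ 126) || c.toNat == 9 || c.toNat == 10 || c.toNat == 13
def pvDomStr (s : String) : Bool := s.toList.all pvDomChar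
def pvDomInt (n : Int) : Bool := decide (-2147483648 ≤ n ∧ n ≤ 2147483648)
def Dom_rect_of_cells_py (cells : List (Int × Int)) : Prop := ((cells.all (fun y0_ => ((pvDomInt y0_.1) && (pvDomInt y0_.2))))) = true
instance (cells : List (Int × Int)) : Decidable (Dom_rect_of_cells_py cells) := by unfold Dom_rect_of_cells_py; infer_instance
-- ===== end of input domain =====

-- B replaces A's size-vs-area fullness formula by a running-min/max bounds pass and an
-- explicit membership scan of the bounding rectangle (objective: alternative, same result).

-- ===== PORT A =====
def rect_of_cells_py (cells : List (Int × Int)) : (Int × Int) × (Int × Int) × Bool :=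
  let rows := cells.map (fun p => p.1)
  let cols := cells.map (fun p => p.2)
  match PySem.List.min? rows (fun x => x), PySem.List.max? rows (fun x => x),
        PySem.List.min? cols (fun x => x), PySem.List.max? cols (fun x => x) with
  | some r1, some r2, some c1, some c2 =>
      let expected := (r2 - r1 + 1) * (c2 - c1 + 1)
      let is_full := decide ((cells.length : Int) = expected)
      ((r1, c1), (r2, c2), is_full)
  | _, _, _, _ => ((0, 0), (0, 0), false)   -- min() of an empty list raises ValueError; excluded by Pre_

-- ===== PORT B =====
-- B's 'all((r,c) in cells for c in range(c1,c2+1))' inner generator: short-circuiting scan of one row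
def pvAllRow (cells : List (Int × Int)) (rr cc : Int) : Nat → Bool
  | 0 => true
  | n + 1 => cells.contains (rr, cc) && pvAllRow cells rr (cc + 1) n

-- the outer generator over range(r1, r2+1), likewise short-circuiting
def pvAllRect (cells : List (Int × Int)) (c1 rr : Int) (fuelC : Nat) : Nat → Bool
  | 0 => true
  | n + 1 => pvAllRow cells rr c1 fuelC && pvAllRect cells c1 (rr + 1) fuelC n

def rect_of_cells_py_alt (cells : List (Int × Int)) : (Int × Int) × (Int × Int) × Bool :=
  match cells with
  | [] => ((0, 0), (0, 0), false)           -- B raises ValueError on the empty set too; excluded by Pre_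
  | (r, c) :: rest =>
      let b := rest.foldl
        (fun a p => (min a.1 p.1, min a.2.1 p.2, max a.2.2.1 p.1, max a.2.2.2 p.2))
        (r, c, r, c)
      let is_full := pvAllRect cells b.2.1 b.1 (b.2.2.2 + 1 - b.2.1).toNat (b.2.2.1 + 1 - b.1).toNat
      ((b.1, b.2.1), (b.2.2.1, b.2.2.2), is_full)

-- ===== PRECONDITION & SPEC =====
-- Pre_ excludes the empty set (both A and B raise ValueError there). The Nodup conjunct is
-- the encoding invariant of the Python set argument (a set's list encoding has distinct
-- elements); it excludes no input the Python function can receive.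
def Pre_rect_of_cells_py (cells : List (Int × Int)) : Prop := cells ≠ [] ∧ cells.Nodup
instance (cells : List (Int × Int)) : Decidable (Pre_rect_of_cells_py cells) := by
  unfold Pre_rect_of_cells_py; infer_instance

def pvWitness_rect_of_cells_py : (List (Int × Int)) := [(2, 3), (2, 4)]

def Spec_rect_of_cells_py (cells : List (Int × Int)) (out : (Int × Int) × (Int × Int) × Bool) : Prop := out = rect_of_cells_py_alt cells
instance (cells : List (Int × Int)) (out : (Int × Int) × (Int × Int) × Bool) : Decidable (Spec_rect_of_cells_py cells out) := by unfold Spec_rect_of_cells_py; infer_instance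

-- ===== CLAIM (what is proved, stated in full; the proofs are below) =====
def Claim_equal_rect_of_cells_py : Prop := ∀ (cells : List (Int × Int)), Dom_rect_of_cells_py cells → Pre_rect_of_cells_py cells → Spec_rect_of_cells_py cells (rect_of_cells_py cells)

-- ===== LEMMAS AND PROOFS =====

lemma pv_quadfold (rest : List (Int × Int)) (a b c d : Int) :
    rest.foldl (fun a p => (min a.1 p.1, min a.2.1 p.2, max a.2.2.1 p.1, max a.2.2.2 p.2)) (a, b, c, d)
      = ((rest.map (fun p => p.1)).foldl min a, (rest.map (fun p => p.2)).foldl min b,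
         (rest.map (fun p => p.1)).foldl max c, (rest.map (fun p => p.2)).foldl max d) := by
  induction rest generalizing a b c d with
  | nil => simp
  | cons x t ih => simp [ih]


lemma pv_full_iff (cells : List (Int × Int)) (hnd : cells.Nodup) (r1 c1 r2 c2 : Int)
    (hsub : ∀ p ∈ cells, r1 ≤ p.1 ∧ p.1 ≤ r2 ∧ c1 ≤ p.2 ∧ p.2 ≤ c2)
    (hr : r1 ≤ r2) (hc : c1 ≤ c2) :
    ((cells.length : Int) = (r2 - r1 + 1) * (c2 - c1 + 1)) ↔
      (∀ rr ∈ PySem.List.pyRange r1 (r2 + 1) 1, ∀ cc ∈ PySem.List.pyRange c1 (c2 + 1) 1,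
        (rr, cc) ∈ cells) := by
  set R := PySem.List.pyRange r1 (r2 + 1) 1 ×ˢ PySem.List.pyRange c1 (c2 + 1) 1 with hR
  have hRnd : R.Nodup :=
    List.Nodup.product (PySem.List.nodup_pyRange_one r1 (r2 + 1)) (PySem.List.nodup_pyRange_one c1 (c2 + 1))
  have hsubR : cells ⊆ R := by
    intro p hp
    obtain ⟨h1, h2, h3, h4⟩ := hsub p hp
    have : (p.1, p.2) ∈ R := by
      rw [hR, List.mem_product]
      simp [PySem.List.mem_pyRange_one]
      omega
    simpa using this
  have hlenR : (R.length : Int) = (r2 - r1 + 1) * (c2 - c1 + 1) := by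
    rw [hR, List.length_product, PySem.List.length_pyRange_one, PySem.List.length_pyRange_one,
      Nat.cast_mul, Int.toNat_of_nonneg (by omega), Int.toNat_of_nonneg (by omega)]
    ring
  have hsp : List.Subperm cells R := List.subperm_of_subset hnd hsubR
  constructor
  · intro h
    have hlen : R.length ≤ cells.length := by
      have : (cells.length : Int) = (R.length : Int) := by rw [h, hlenR]
      omega
    have hperm := List.Subperm.perm_of_length_le hsp hlen
    intro rr hrr cc hcc
    exact hperm.symm.subset (by rw [hR, List.mem_product]; exact ⟨hrr, hcc⟩)
  · intro h
    have hRsub : R ⊆ cells := by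
      intro p hp
      rw [hR, List.mem_product] at hp
      exact h p.1 hp.1 p.2 hp.2
    have h2 : List.Subperm R cells := List.subperm_of_subset hRnd hRsub
    have hl : cells.length = R.length :=
      le_antisymm (List.Subperm.length_le hsp) (List.Subperm.length_le h2)
    rw [hl]; exact hlenR

lemma pv_row_eq (cells : List (Int × Int)) (rr lo : Int) (n : Nat) :
    pvAllRow cells rr lo n
      = (PySem.List.pyRange lo (lo + n) 1).all (fun x => cells.contains (rr, x)) := by
  induction n generalizing lo with
  | zero => simp [pvAllRow, PySem.List.pyRange_one_eq_nil]
  | succ m ih =>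
      have h : lo + ((m + 1 : Nat) : Int) = (lo + 1) + (m : Int) := by push_cast; ring
      rw [pvAllRow, h, PySem.List.pyRange_one_cons (by omega), List.all_cons, ih]

lemma pv_rect_eq (cells : List (Int × Int)) (c1 lo : Int) (fuelC : Nat) (n : Nat) :
    pvAllRect cells c1 lo fuelC n
      = (PySem.List.pyRange lo (lo + n) 1).all (fun rr => pvAllRow cells rr c1 fuelC) := by
  induction n generalizing lo with
  | zero => simp [pvAllRect, PySem.List.pyRange_one_eq_nil]
  | succ m ih =>
      have h : lo + ((m + 1 : Nat) : Int) = (lo + 1) + (m : Int) := by push_cast; ring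
      rw [pvAllRect, h, PySem.List.pyRange_one_cons (by omega), List.all_cons, ih]

lemma pv_rect_full (cells : List (Int × Int)) (r1 c1 r2 c2 : Int)
    (hr : r1 ≤ r2) (hc : c1 ≤ c2) :
    pvAllRect cells c1 r1 (c2 + 1 - c1).toNat (r2 + 1 - r1).toNat
      = (PySem.List.pyRange r1 (r2 + 1) 1).all (fun rr =>
          (PySem.List.pyRange c1 (c2 + 1) 1).all (fun cc => cells.contains (rr, cc))) := by
  rw [pv_rect_eq, show r1 + (((r2 + 1 - r1).toNat : Nat) : Int) = r2 + 1 by omega]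
  simp only [pv_row_eq, show c1 + (((c2 + 1 - c1).toNat : Nat) : Int) = c2 + 1 by omega]

-- A = B on every nonempty duplicate-free cell list
theorem pv_main : ∀ (cells : List (Int × Int)), cells ≠ [] → cells.Nodup →
    rect_of_cells_py cells = rect_of_cells_py_alt cells := by
  intro cells hne hnd
  match cells with
  | [] => exact absurd rfl hne
  | (r, c) :: rest =>
    have hmr := PySem.List.min?_id_cons r (rest.map (fun p => p.1))
    have hMr := PySem.List.max?_id_cons r (rest.map (fun p => p.1))
    have hmc := PySem.List.min?_id_cons c (rest.map (fun p => p.2))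
    have hMc := PySem.List.max?_id_cons c (rest.map (fun p => p.2))
    set R1 := (rest.map (fun p => p.1)).foldl min r with hR1
    set R2 := (rest.map (fun p => p.1)).foldl max r with hR2
    set C1 := (rest.map (fun p => p.2)).foldl min c with hC1
    set C2 := (rest.map (fun p => p.2)).foldl max c with hC2
    have hbounds : ∀ p ∈ (r, c) :: rest, R1 ≤ p.1 ∧ p.1 ≤ R2 ∧ C1 ≤ p.2 ∧ p.2 ≤ C2 := by
      intro p hp
      have hp1 : p.1 ∈ r :: rest.map (fun p => p.1) := by
        rcases List.mem_cons.1 hp with h | h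
        · simp [h]
        · exact List.mem_cons_of_mem _ (List.mem_map_of_mem h)
      have hp2 : p.2 ∈ c :: rest.map (fun p => p.2) := by
        rcases List.mem_cons.1 hp with h | h
        · simp [h]
        · exact List.mem_cons_of_mem _ (List.mem_map_of_mem h)
      exact ⟨PySem.List.min?_isMin hmr p.1 hp1, PySem.List.max?_isMax hMr p.1 hp1,
        PySem.List.min?_isMin hmc p.2 hp2, PySem.List.max?_isMax hMc p.2 hp2⟩
    have hrb : R1 ≤ R2 := le_trans (PySem.List.min?_isMin hmr r (by simp))
      (PySem.List.max?_isMax hMr r (by simp))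
    have hcb : C1 ≤ C2 := le_trans (PySem.List.min?_isMin hmc c (by simp))
      (PySem.List.max?_isMax hMc c (by simp))
    have hfull := pv_full_iff ((r, c) :: rest) hnd R1 C1 R2 C2 hbounds hrb hcb
    simp only [rect_of_cells_py, rect_of_cells_py_alt, List.map_cons, hmr, hMr, hmc, hMc,
      pv_quadfold]
    rw [← hR1, ← hR2, ← hC1, ← hC2,
      pv_rect_full ((r, c) :: rest) R1 C1 R2 C2 hrb hcb]
    refine Prod.ext rfl (Prod.ext rfl ?_)
    rw [Bool.eq_iff_iff]
    simp only [decide_eq_true_eq, List.all_eq_true, List.contains_eq_mem, decide_eq_true_eq]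
    exact hfull.trans (by tauto)

-- ===== VERDICT (by name: the statement is the Claim_ definition above) =====
theorem rect_of_cells_py_spec : Claim_equal_rect_of_cells_py := by
  intro cells _ hpre
  unfold Spec_rect_of_cells_py
  exact pv_main cells hpre.1 hpre.2
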